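-- pv_equiv track=rewrite | github.com/henriquecscode/discordbot_up | src/input.py | get_non_week_crossover_occupancy
-- ===== SOURCE A (Python) =====
-- from typing import List, Tuple
--
-- def get_non_week_crossover_occupancy(week_occupancy: List[Tuple[int, int]]) -> List[Tuple[int, int]]:
--     week_occupied_sorted = sorted(week_occupancy, key=lambda x: x[1])
--     unfold_midnight_saturday_edge_case = []
--     week_maximum_time = 7 * 24 * 60 # 10080
--     for i in range(len(week_occupied_sorted)-1, -1, -1):
--         start_time, end_time = week_occupied_sorted[i]
--         if end_time > week_maximum_time: # Went past the week maximum minutes, and started on 0 (for the first day)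
--             unfold_midnight_saturday_edge_case.append((0, end_time - week_maximum_time))
--             week_occupied_sorted[i] = (start_time, week_maximum_time)
--         else:
--             break
--     non_week_crossover_occupancy = unfold_midnight_saturday_edge_case + week_occupied_sorted
--     return non_week_crossover_occupancy
-- ===== SOURCE B (Python) =====
-- WEEK_MAXIMUM_TIME = 7 * 24 * 60  # 10080
--
-- def get_non_week_crossover_occupancy(week_occupancy):
--     # Sort ascending by end time, then BINARY-SEARCH for the first interval whose
--     # end exceeds the week maximum: all crossing intervals form a contiguous tail.
--     # Assemble the result from three slices, without scanning elements one by one.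
--     ordered = sorted(week_occupancy, key=lambda x: x[1])
--     lo, hi = 0, len(ordered)
--     while lo < hi:
--         mid = (lo + hi) // 2
--         if ordered[mid][1] > WEEK_MAXIMUM_TIME:
--             hi = mid
--         else:
--             lo = mid + 1
--     tail = ordered[lo:]
--     return [(0, e - WEEK_MAXIMUM_TIME) for _s, e in reversed(tail)] \
--         + ordered[:lo] + [(s, WEEK_MAXIMUM_TIME) for s, _e in tail]
-- ===== Notes on version B (the rewrite author's own statement) =====
-- stated objective: alternative
-- what changed: Instead of a backward element-by-element early-break loop with in-place mutation, B binary-searches the end-sorted list for the first week-crossing interval (the crossing intervals are a contiguous tail) and assembles the result from three slices: the reversed wrapped tail, the untouched prefix, and the tail capped at the week maximum.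
import Mathlib
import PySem

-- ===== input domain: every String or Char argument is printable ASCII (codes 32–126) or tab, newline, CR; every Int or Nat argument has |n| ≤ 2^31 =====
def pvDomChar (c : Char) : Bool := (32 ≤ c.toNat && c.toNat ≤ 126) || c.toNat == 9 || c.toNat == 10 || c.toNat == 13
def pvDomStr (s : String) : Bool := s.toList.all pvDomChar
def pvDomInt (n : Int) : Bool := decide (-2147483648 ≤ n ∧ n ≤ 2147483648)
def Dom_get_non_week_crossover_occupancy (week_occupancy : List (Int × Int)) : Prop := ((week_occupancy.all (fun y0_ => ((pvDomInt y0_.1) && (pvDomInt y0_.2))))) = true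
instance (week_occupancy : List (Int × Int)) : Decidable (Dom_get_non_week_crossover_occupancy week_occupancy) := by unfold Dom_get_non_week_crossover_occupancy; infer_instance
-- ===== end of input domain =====

-- B replaces A's backward early-break loop with in-place mutation by a binary search
-- for the contiguous week-crossing tail of the end-sorted list plus slice assembly
-- (objective: alternative); return values proved equal on all inputs.

-- ===== PORT A =====
-- Backward loop 'for i in range(len-1, -1, -1)': k counts the remaining indices,
-- the current index is i = k-1; 'break' returns, list mutation is List.set.
def pvALoop (ws : List (Int × Int)) (acc : List (Int × Int)) : Nat → List (Int × Int) × List (Int × Int)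
  | 0 => (acc, ws)
  | k + 1 =>
    match ws[k]? with
    | none => (acc, ws)  -- unreachable: k < ws.length at every call
    | some (start_time, end_time) =>
      if end_time > 10080 then
        pvALoop (ws.set k (start_time, 10080)) (acc ++ [(0, end_time - 10080)]) k
      else
        (acc, ws)

def get_non_week_crossover_occupancy (week_occupancy : List (Int × Int)) : List (Int × Int) :=
  let week_occupied_sorted := PySem.List.sorted week_occupancy (fun x => x.2) false
  let res := pvALoop week_occupied_sorted [] week_occupied_sorted.length
  res.1 ++ res.2

-- ===== PORT B =====
-- The 'while lo < hi' binary-search loop, state (lo, hi); ordered[mid][1] is a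
-- guarded lookup (mid < hi ≤ len at every call, so the none branch is unreachable).
def pvFindCut (xs : List (Int × Int)) (lo hi : Nat) : Nat :=
  if _h : lo < hi then
    match xs[(lo + hi) / 2]? with
    | none => lo  -- unreachable
    | some p =>
      if p.2 > 10080 then pvFindCut xs lo ((lo + hi) / 2)
      else pvFindCut xs ((lo + hi) / 2 + 1) hi
  else lo
termination_by hi - lo
decreasing_by all_goals omega

-- ordered[lo:] and ordered[:lo] with 0 ≤ lo ≤ len are exactly drop/take.
def get_non_week_crossover_occupancy_alt (week_occupancy : List (Int × Int)) : List (Int × Int) :=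
  let ordered := PySem.List.sorted week_occupancy (fun x => x.2) false
  let lo := pvFindCut ordered 0 ordered.length
  let tail := ordered.drop lo
  (tail.reverse.map (fun p => ((0 : Int), p.2 - 10080)))
    ++ ordered.take lo ++ (tail.map (fun p => (p.1, (10080 : Int))))

-- ===== PRECONDITION & SPEC =====
def Spec_get_non_week_crossover_occupancy (week_occupancy : List (Int × Int)) (out : List (Int × Int)) : Prop := out = get_non_week_crossover_occupancy_alt week_occupancy
instance (week_occupancy : List (Int × Int)) (out : List (Int × Int)) : Decidable (Spec_get_non_week_crossover_occupancy week_occupancy out) := by unfold Spec_get_non_week_crossover_occupancy; infer_instance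

-- ===== CLAIM (what is proved, stated in full; the proofs are below) =====
def Claim_equal_get_non_week_crossover_occupancy : Prop := ∀ (week_occupancy : List (Int × Int)), Dom_get_non_week_crossover_occupancy week_occupancy → Spec_get_non_week_crossover_occupancy week_occupancy (get_non_week_crossover_occupancy week_occupancy)

-- ===== LEMMAS AND PROOFS =====

-- The A-loop only touches indices < k, so a suffix rides along unchanged.
theorem pvALoop_append (ys : List (Int × Int)) :
    ∀ (k : Nat) (xs acc : List (Int × Int)), k ≤ xs.length →
      pvALoop (xs ++ ys) acc k = ((pvALoop xs acc k).1, (pvALoop xs acc k).2 ++ ys) := by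
  intro k
  induction k with
  | zero => intro xs acc _; simp [pvALoop]
  | succ k ih =>
    intro xs acc hk
    have hklt : k < xs.length := hk
    have hget : (xs ++ ys)[k]? = xs[k]? := List.getElem?_append_left hklt
    simp only [pvALoop, hget]
    cases hx : xs[k]? with
    | none => simp at hx; omega
    | some p =>
      rcases p with ⟨s, e⟩
      by_cases he : e > 10080
      · have hset : (xs ++ ys).set k (s, 10080) = xs.set k (s, 10080) ++ ys :=
          List.set_append_left _ _ hklt
        simp only [he, if_pos, hset]
        rw [ih _ _ (by simpa using Nat.le_of_lt hklt)]
      · simp [he]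

-- Characterisation of A's loop on an end-sorted list, processed from the back.
theorem pvALoop_sorted :
    ∀ (ws : List (Int × Int)), ws.Pairwise (fun a b => a.2 ≤ b.2) →
      ∀ acc, pvALoop ws acc ws.length =
        (acc ++ ((ws.filter (fun p => p.2 > 10080)).map (fun p => ((0 : Int), p.2 - 10080))).reverse,
         ws.map (fun p => (p.1, if p.2 > 10080 then (10080 : Int) else p.2))) := by
  intro ws
  induction ws using List.reverseRecOn with
  | nil => intro _ acc; simp [pvALoop]
  | append_singleton xs x ih =>
    intro hpw acc
    have hxs : xs.Pairwise (fun a b => a.2 ≤ b.2) := (List.pairwise_append.mp hpw).1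
    have hbound : ∀ a ∈ xs, a.2 ≤ x.2 := by
      intro a ha
      exact (List.pairwise_append.mp hpw).2.2 a ha x (by simp)
    have hlen : (xs ++ [x]).length = xs.length + 1 := by simp
    rw [hlen]
    have hget : (xs ++ [x])[xs.length]? = some x := by simp
    rcases x with ⟨s, e⟩
    simp only [pvALoop, hget]
    by_cases he : e > 10080
    · have hset : (xs ++ [(s, e)]).set xs.length (s, 10080) = xs ++ [(s, (10080 : Int))] := by
        rw [List.set_append_right _ _ (le_refl _)]
        simp
      simp only [he, if_pos, hset]
      rw [pvALoop_append [(s, (10080 : Int))] xs.length xs _ (le_refl _)]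
      rw [ih hxs]
      simp [he, List.filter_append, List.map_append]
    · simp only [he, if_neg, not_false_iff]
      have hnofilter : (xs ++ [(s, e)]).filter (fun p => p.2 > 10080) = [] := by
        rw [List.filter_eq_nil_iff]
        intro a ha
        rcases List.mem_append.mp ha with h | h
        · have := hbound a h
          simp only [gt_iff_lt, decide_eq_true_eq] at *
          omega
        · simp at h; subst h; simp only [gt_iff_lt, decide_eq_true_eq]; omega
      have hmapid : (xs ++ [(s, e)]).map (fun p => (p.1, if p.2 > 10080 then (10080 : Int) else p.2)) = xs ++ [(s, e)] := by
        have hcg : ∀ a ∈ xs ++ [(s, e)],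
            (fun p : Int × Int => (p.1, if p.2 > 10080 then (10080 : Int) else p.2)) a = id a := by
          intro a ha
          rcases List.mem_append.mp ha with h | h
          · have := hbound a h
            have hna : ¬ a.2 > 10080 := by simp at this ⊢; omega
            simp [hna]
          · simp at h; subst h; simp [he]
        rw [List.map_congr_left hcg, List.map_id]
      rw [hnofilter, hmapid]
      simp

-- Binary-search invariant: on an end-sorted list, pvFindCut returns a cut r with
-- everything before r not crossing and everything from r on crossing.
theorem pvFindCut_spec (xs : List (Int × Int)) (hpw : xs.Pairwise (fun a b => a.2 ≤ b.2)) :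
    ∀ (n lo hi : Nat), hi - lo ≤ n → lo ≤ hi → hi ≤ xs.length →
      (∀ i (h : i < xs.length), i < lo → ¬ xs[i].2 > 10080) →
      (∀ i (h : i < xs.length), hi ≤ i → xs[i].2 > 10080) →
      lo ≤ pvFindCut xs lo hi ∧ pvFindCut xs lo hi ≤ hi ∧
      (∀ i (h : i < xs.length), i < pvFindCut xs lo hi → ¬ xs[i].2 > 10080) ∧
      (∀ i (h : i < xs.length), pvFindCut xs lo hi ≤ i → xs[i].2 > 10080) := by
  have hmono : ∀ i j (hi' : i < xs.length) (hj' : j < xs.length), i ≤ j → xs[i].2 ≤ xs[j].2 := by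
    intro i j hi' hj' hij
    rcases Nat.lt_or_ge i j with h | h
    · exact (List.pairwise_iff_getElem.mp hpw) i j hi' hj' h
    · have : i = j := by omega
      subst this; exact le_refl _
  intro n
  induction n with
  | zero =>
    intro lo hi hn hlohi _ hlow hhigh
    have : lo = hi := by omega
    subst this
    rw [pvFindCut]
    simp only [lt_irrefl, dite_false]
    exact ⟨le_refl _, le_refl _, hlow, hhigh⟩
  | succ n ih =>
    intro lo hi hn hlohi hhile hlow hhigh
    rw [pvFindCut]
    by_cases h : lo < hi
    · simp only [h, dite_true]
      have hmidlt : (lo + hi) / 2 < xs.length := by omega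
      have hget : xs[(lo + hi) / 2]? = some xs[(lo + hi) / 2] := List.getElem?_eq_getElem hmidlt
      rw [hget]
      by_cases hp : xs[(lo + hi) / 2].2 > 10080
      · simp only [hp, if_pos]
        have hrec := ih lo ((lo + hi) / 2) (by omega) (by omega) (by omega) hlow
          (by intro i hi' hmi; exact lt_of_lt_of_le hp (hmono _ _ hmidlt hi' hmi))
        exact ⟨hrec.1, le_trans hrec.2.1 (by omega), hrec.2.2⟩
      · simp only [hp, if_neg, not_false_iff]
        have hrec := ih ((lo + hi) / 2 + 1) hi (by omega) (by omega) hhile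
          (by
            intro i hi' hilt
            intro hcr
            rcases Nat.lt_or_ge i lo with hc | hc
            · exact hlow i hi' hc hcr
            · have : xs[i].2 ≤ xs[(lo + hi) / 2].2 := hmono _ _ hi' hmidlt (by omega)
              omega)
          hhigh
        exact ⟨by omega, hrec.2.1, hrec.2.2⟩
    · simp only [h, dite_false]
      have heq : lo = hi := by omega
      subst heq
      exact ⟨le_refl _, le_refl _, hlow, hhigh⟩

-- Pointwise facts about take/drop at the cut, from the index facts.
theorem cut_take (xs : List (Int × Int)) (r : Nat)
    (hlow : ∀ i (h : i < xs.length), i < r → ¬ xs[i].2 > 10080) :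
    ∀ p ∈ xs.take r, ¬ p.2 > 10080 := by
  intro p hp
  rcases List.mem_iff_getElem.mp hp with ⟨i, hi', hpe⟩
  have hil : i < xs.length := lt_of_lt_of_le hi' (by simpa using List.length_take_le r xs)
  have hir : i < r := lt_of_lt_of_le hi' (by simp)
  have : (xs.take r)[i] = xs[i] := List.getElem_take
  rw [this] at hpe
  subst hpe
  exact hlow i hil hir

theorem cut_drop (xs : List (Int × Int)) (r : Nat)
    (hhigh : ∀ i (h : i < xs.length), r ≤ i → xs[i].2 > 10080) :
    ∀ p ∈ xs.drop r, p.2 > 10080 := by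
  intro p hp
  rcases List.mem_iff_getElem.mp hp with ⟨i, hi', hpe⟩
  have hil : r + i < xs.length := by
    have := hi'; simp [List.length_drop] at this; omega
  have : (xs.drop r)[i] = xs[r + i] := List.getElem_drop
  rw [this] at hpe
  subst hpe
  exact hhigh (r + i) hil (by omega)

-- ===== VERDICT (by name: the statement is the Claim_ definition above) =====
theorem get_non_week_crossover_occupancy_spec : Claim_equal_get_non_week_crossover_occupancy := by
  intro ws _
  unfold Spec_get_non_week_crossover_occupancy get_non_week_crossover_occupancy
    get_non_week_crossover_occupancy_alt
  dsimp only
  have hpw := PySem.List.sorted_pairwise ws (fun x : Int × Int => x.2)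
  set or := PySem.List.sorted ws (fun x : Int × Int => x.2) false with hor
  rw [pvALoop_sorted _ hpw []]
  have hcut := pvFindCut_spec or hpw (or.length) 0 or.length (by omega) (by omega) (le_refl _)
    (by intro i _ hc; omega) (by intro i hi' hc; omega)
  set r := pvFindCut or 0 or.length with hr
  obtain ⟨-, hrle, hlow, hhigh⟩ := hcut
  have htk := cut_take or r hlow
  have hdr := cut_drop or r hhigh
  have hsplit : or = or.take r ++ or.drop r := (List.take_append_drop r or).symm
  -- filter = drop r
  have hfil : or.filter (fun p => p.2 > 10080) = or.drop r := by
    conv_lhs => rw [hsplit]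
    rw [List.filter_append]
    have h1 : (or.take r).filter (fun p => p.2 > 10080) = [] := by
      rw [List.filter_eq_nil_iff]
      intro a ha
      have := htk a ha
      simpa using this
    have h2 : (or.drop r).filter (fun p => p.2 > 10080) = or.drop r := by
      rw [List.filter_eq_self]
      intro a ha
      have := hdr a ha
      simpa using this
    rw [h1, h2]; simp
  -- capping map = take r ++ capped drop r
  have hmap : or.map (fun p => (p.1, if p.2 > 10080 then (10080 : Int) else p.2))
      = or.take r ++ (or.drop r).map (fun p => (p.1, (10080 : Int))) := by
    conv_lhs => rw [hsplit]
    rw [List.map_append]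
    congr 1
    · have hcg : ∀ a ∈ or.take r,
          (fun p : Int × Int => (p.1, if p.2 > 10080 then (10080 : Int) else p.2)) a = id a := by
        intro a ha
        have := htk a ha
        simp [this]
      rw [List.map_congr_left hcg, List.map_id]
    · apply List.map_congr_left
      intro a ha
      have := hdr a ha
      simp [this]
  rw [hfil, hmap]
  rw [List.map_reverse]
  simp
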